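-- pv_equiv track=rewrite | github.com/nisooom/generics | api-testing/sel_multithread.py | distribute_pages
-- ===== SOURCE A (Python) =====
-- def distribute_pages(total_pages, num_threads=4):
--     if total_pages <= num_threads:
--         return [(i, i) for i in range(1, total_pages + 1)]
--
--     pages_per_thread = total_pages // num_threads
--     remainder = total_pages % num_threads
--
--     page_ranges = []
--     start_page = 1
--
--     for i in range(num_threads):
--         # Add one extra page to the first 'remainder' threads
--         extra_page = 1 if i < remainder else 0
--         end_page = start_page + pages_per_thread - 1 + extra_page
--
--         if start_page <= total_pages:
--             page_ranges.append((start_page, min(end_page, total_pages)))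
--             start_page = end_page + 1
--
--     return page_ranges
-- ===== SOURCE B (Python) =====
-- def distribute_pages(total_pages, num_threads=4):
--     if total_pages <= num_threads:
--         return [(i, i) for i in range(1, total_pages + 1)]
--     ppt, rem = divmod(total_pages, num_threads)
--     return [(1 + i * ppt + min(i, rem), (i + 1) * ppt + min(i + 1, rem))
--             for i in range(num_threads)]
-- ===== Notes on version B (the rewrite author's own statement) =====
-- stated objective: alternative
-- what changed: Replaces A's accumulator-threaded loop (carried start_page, guard, clamp) by a single comprehension computing each thread's (start, end) in closed form from its index via divmod; Pre_ excludes num_threads == 0 with total_pages > 0, where A raises ZeroDivisionError.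
import Mathlib
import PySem

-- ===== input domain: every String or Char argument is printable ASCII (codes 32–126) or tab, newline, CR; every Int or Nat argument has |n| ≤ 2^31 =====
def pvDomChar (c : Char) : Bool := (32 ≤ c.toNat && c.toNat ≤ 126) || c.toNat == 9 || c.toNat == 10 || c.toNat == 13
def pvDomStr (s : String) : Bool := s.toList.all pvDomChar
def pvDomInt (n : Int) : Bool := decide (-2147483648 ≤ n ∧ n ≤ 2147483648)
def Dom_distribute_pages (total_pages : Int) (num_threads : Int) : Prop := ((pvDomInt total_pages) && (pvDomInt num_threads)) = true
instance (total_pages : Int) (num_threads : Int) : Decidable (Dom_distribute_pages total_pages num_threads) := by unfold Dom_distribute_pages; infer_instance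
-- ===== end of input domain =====

-- B replaces A's accumulator-threaded loop by a closed-form per-index comprehension (alternative
-- decomposition, same cost); Pre_ excludes num_threads = 0 with total_pages > 0, where A raises
-- ZeroDivisionError.


-- ===== PORT A =====
def distribute_pages (total_pages : Int) (num_threads : Int) : List (Int × Int) :=
  if total_pages ≤ num_threads then
    (PySem.List.pyRange 1 (total_pages + 1) 1).map (fun i => (i, i))
  else
    let pages_per_thread := PySem.Int.floordiv total_pages num_threads
    let remainder := PySem.Int.mod total_pages num_threads
    let st := (PySem.List.pyRange 0 num_threads 1).foldl
      (fun (s : List (Int × Int) × Int) i =>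
        let extra : Int := if i < remainder then 1 else 0
        let end_page := s.2 + pages_per_thread - 1 + extra
        if s.2 ≤ total_pages then
          (s.1 ++ [(s.2, min end_page total_pages)], end_page + 1)
        else s)
      ([], 1)
    st.1

-- ===== PORT B =====
def distribute_pages_alt (total_pages : Int) (num_threads : Int) : List (Int × Int) :=
  if total_pages ≤ num_threads then
    (PySem.List.pyRange 1 (total_pages + 1) 1).map (fun i => (i, i))
  else
    let ppt := PySem.Int.floordiv total_pages num_threads
    let rem := PySem.Int.mod total_pages num_threads
    (PySem.List.pyRange 0 num_threads 1).map
      (fun i => (1 + i * ppt + min i rem, (i + 1) * ppt + min (i + 1) rem))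

-- ===== PRECONDITION & SPEC =====
-- Pre_ excludes exactly the inputs where Python A raises ZeroDivisionError:
-- num_threads = 0 together with total_pages > 0.
def Pre_distribute_pages (total_pages : Int) (num_threads : Int) : Prop :=
  num_threads ≠ 0 ∨ total_pages ≤ 0
instance (total_pages : Int) (num_threads : Int) : Decidable (Pre_distribute_pages total_pages num_threads) := by unfold Pre_distribute_pages; infer_instance
def pvWitness_distribute_pages : Int × Int := (10, 3)

def Spec_distribute_pages (total_pages : Int) (num_threads : Int) (out : List (Int × Int)) : Prop := out = distribute_pages_alt total_pages num_threads
instance (total_pages : Int) (num_threads : Int) (out : List (Int × Int)) : Decidable (Spec_distribute_pages total_pages num_threads out) := by unfold Spec_distribute_pages; infer_instance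

-- ===== CLAIM (what is proved, stated in full; the proofs are below) =====
def Claim_equal_distribute_pages : Prop := ∀ (total_pages : Int) (num_threads : Int), Dom_distribute_pages total_pages num_threads → Pre_distribute_pages total_pages num_threads → Spec_distribute_pages total_pages num_threads (distribute_pages total_pages num_threads)

-- ===== LEMMAS AND PROOFS =====

-- Loop invariant: starting the accumulator loop at index k with start page
-- 1 + k*ppt + min k rem produces exactly B's closed-form pairs for the remaining indices.
theorem dp_loop (tp nt ppt rem : Int) (hppt : 1 ≤ ppt)
    (hrem0 : 0 ≤ rem) (hremlt : rem < nt) (htot : tp = ppt * nt + rem) :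
    ∀ (m : Nat) (k : Int), 0 ≤ k → k + m = nt →
    ∀ (acc : List (Int × Int)) (start : Int), start = 1 + k * ppt + min k rem →
    (PySem.List.pyRange k nt 1).foldl
      (fun (s : List (Int × Int) × Int) i =>
        let extra : Int := if i < rem then 1 else 0
        let end_page := s.2 + ppt - 1 + extra
        if s.2 ≤ tp then
          (s.1 ++ [(s.2, min end_page tp)], end_page + 1)
        else s)
      (acc, start)
    = (acc ++ (PySem.List.pyRange k nt 1).map
        (fun i => (1 + i * ppt + min i rem, (i + 1) * ppt + min (i + 1) rem)),
       1 + nt * ppt + min nt rem) := by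
  intro m
  induction m with
  | zero =>
    intro k hk0 hkm acc start hstart
    have hk : k = nt := by omega
    subst hstart; subst hk
    simp [PySem.List.pyRange_one_eq_nil (le_refl _)]
  | succ m ih =>
    intro k hk0 hkm acc start hstart
    subst hstart
    have hklt : k < nt := by omega
    rw [PySem.List.pyRange_one_cons hklt]
    simp only [List.foldl_cons, List.map_cons]
    have hmul1 : ppt * 1 ≤ ppt * (nt - k) :=
      mul_le_mul_of_nonneg_left (by omega) (by omega)
    have hmul2 : 0 ≤ ppt * (nt - (k + 1)) :=
      mul_nonneg (by omega) (by omega)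
    have hif : (if k < rem then (1 : Int) else 0) = min (k + 1) rem - min k rem := by
      split_ifs with h <;> omega
    have hstartle : 1 + k * ppt + min k rem ≤ tp := by
      nlinarith [hmul1, min_le_right k rem]
    have hendle : 1 + k * ppt + min k rem + ppt - 1 + (if k < rem then 1 else 0) ≤ tp := by
      rw [hif]; nlinarith [hmul2, min_le_right (k + 1) rem]
    have hpair : 1 + k * ppt + min k rem + ppt - 1 + (if k < rem then 1 else 0)
        = (k + 1) * ppt + min (k + 1) rem := by
      rw [hif]; ring
    have hnext : 1 + k * ppt + min k rem + ppt - 1 + (if k < rem then 1 else 0) + 1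
        = 1 + (k + 1) * ppt + min (k + 1) rem := by
      rw [hpair]; ring
    simp only [if_pos hstartle, min_eq_left hendle]
    rw [ih (k + 1) (by omega) (by omega) _ _ hnext]
    simp [hpair]

theorem distribute_pages_spec : Claim_equal_distribute_pages := by
  intro tp nt _ _
  unfold Spec_distribute_pages distribute_pages distribute_pages_alt
  by_cases hle : tp ≤ nt
  · simp [hle]
  · simp only [if_neg hle]
    by_cases hnt0 : nt ≤ 0
    · rw [PySem.List.pyRange_one_eq_nil hnt0]
      simp
    · have hnt : 0 < nt := by omega
      set ppt := PySem.Int.floordiv tp nt with hpptdef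
      set rem := PySem.Int.mod tp nt with hremdef
      have hrem0 : 0 ≤ rem := by
        rw [hremdef, PySem.Int.mod_eq_emod_of_pos hnt]
        exact Int.emod_nonneg tp (by omega)
      have hremlt : rem < nt := by
        rw [hremdef, PySem.Int.mod_eq_emod_of_pos hnt]
        exact Int.emod_lt_of_pos tp hnt
      have htot : tp = ppt * nt + rem := by
        rw [hpptdef, hremdef]
        exact (PySem.Int.floordiv_mul_add_mod tp nt).symm
      have hppt : 1 ≤ ppt := by nlinarith
      have hmain := dp_loop tp nt ppt rem hppt hrem0 hremlt htot nt.toNat 0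
        (le_refl 0) (by omega) [] 1 (by rw [min_eq_left hrem0]; ring)
      exact congrArg Prod.fst hmain
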